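-- pv_equiv track=rewrite | github.com/fkguo/autoresearch-lab | skills/research-team/scripts/gates/check_reproducibility_capsule.py | _has_placeholder_tokens
-- ===== SOURCE A (Python) =====
-- def _has_placeholder_tokens(capsule: str) -> bool:
--     # Common placeholders from the template that must NOT remain in a "complete" capsule.
--     placeholders = [
--         "<FULL COMMAND LINE>",
--         "<path/to/",
--         "<quantity>",
--         "<value>",
--         "<units>",
--         "<YYYY-MM-DD>",
--         "<e.g.",
--     ]
--     lower = capsule.lower()
--     for ph in placeholders:
--         if ph.lower() in lower:
--             return True
--     return False
-- ===== SOURCE B (Python) =====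
-- _PLACEHOLDERS_LOWER = (
--     "<full command line>",
--     "<path/to/",
--     "<quantity>",
--     "<value>",
--     "<units>",
--     "<yyyy-mm-dd>",
--     "<e.g.",
-- )
--
--
-- def _has_placeholder_tokens(capsule: str) -> bool:
--     # Single left-to-right scan: at each position try every placeholder,
--     # instead of one full substring search per placeholder.
--     lower = capsule.lower()
--     return any(
--         lower.startswith(ph, i)
--         for i in range(len(lower))
--         for ph in _PLACEHOLDERS_LOWER
--     )
-- ===== Notes on version B (the rewrite author's own statement) =====
-- stated objective: alternative
-- what changed: B lowercases the placeholders once and makes a single left-to-right scan of the lowered text, trying every placeholder at each position, instead of A's one full substring search (and per-pattern lower()) per placeholder.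
import Mathlib
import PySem

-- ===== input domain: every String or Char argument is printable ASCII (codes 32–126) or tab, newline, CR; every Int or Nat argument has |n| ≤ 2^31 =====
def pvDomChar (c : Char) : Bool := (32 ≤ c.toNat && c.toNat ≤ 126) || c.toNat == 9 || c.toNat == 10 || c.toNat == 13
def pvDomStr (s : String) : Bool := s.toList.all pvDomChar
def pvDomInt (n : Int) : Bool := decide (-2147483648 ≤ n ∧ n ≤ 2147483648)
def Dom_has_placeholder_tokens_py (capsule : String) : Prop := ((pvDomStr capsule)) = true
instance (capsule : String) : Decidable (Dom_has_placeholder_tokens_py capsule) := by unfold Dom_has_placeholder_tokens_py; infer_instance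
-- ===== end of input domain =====

-- B replaces A's per-placeholder substring scans with one left-to-right scan of the
-- lowered text, trying every (pre-lowered) placeholder at each position (objective: alternative).

-- ===== PORT A =====
-- the placeholder list of A, in original case
def pvPhsA : List String :=
  ["<FULL COMMAND LINE>", "<path/to/", "<quantity>", "<value>", "<units>", "<YYYY-MM-DD>", "<e.g."]

-- A's 'for ph in placeholders: if ph.lower() in lower: return True' loop
def pvLoopA (lower : String) : List String → Bool
  | [] => false
  | ph :: rest =>
      if PySem.Str.isIn (PySem.Str.lower ph) lower then true else pvLoopA lower rest

def has_placeholder_tokens_py (capsule : String) : Bool :=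
  pvLoopA (PySem.Str.lower capsule) pvPhsA

-- ===== PORT B =====
-- B's placeholders, already lowercase
def pvPhsB : List (List Char) :=
  ["<full command line>".toList, "<path/to/".toList, "<quantity>".toList, "<value>".toList,
   "<units>".toList, "<yyyy-mm-dd>".toList, "<e.g.".toList]

-- B's single scan: at each position i (each suffix), try every placeholder (startswith)
def pvScanB : List Char → Bool
  | [] => false
  | c :: rest => (pvPhsB.any (fun ph => ph.isPrefixOf (c :: rest))) || pvScanB rest

def has_placeholder_tokens_py_alt (capsule : String) : Bool :=
  pvScanB (PySem.Str.lower capsule).toList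

-- ===== PRECONDITION & SPEC =====
def Spec_has_placeholder_tokens_py (capsule : String) (out : Bool) : Prop := out = has_placeholder_tokens_py_alt capsule
instance (capsule : String) (out : Bool) : Decidable (Spec_has_placeholder_tokens_py capsule out) := by unfold Spec_has_placeholder_tokens_py; infer_instance

-- ===== CLAIM (what is proved, stated in full; the proofs are below) =====
def Claim_equal_has_placeholder_tokens_py : Prop := ∀ (capsule : String), Dom_has_placeholder_tokens_py capsule → Spec_has_placeholder_tokens_py capsule (has_placeholder_tokens_py capsule)

-- ===== LEMMAS AND PROOFS =====

-- B's scan finds exactly the (nonempty) placeholders that occur as an infix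
lemma pvScanB_iff (l : List Char) :
    pvScanB l = true ↔ ∃ ph ∈ pvPhsB, ph <:+: l := by
  induction l with
  | nil =>
    constructor
    · intro h; simp [pvScanB] at h
    · rintro ⟨ph, hmem, hinf⟩
      have hnil := List.eq_nil_of_infix_nil hinf
      subst hnil
      revert hmem; decide
  | cons c rest ih =>
    simp only [pvScanB, Bool.or_eq_true, List.any_eq_true, List.isPrefixOf_iff_prefix, ih]
    constructor
    · rintro (⟨ph, hmem, hpre⟩ | ⟨ph, hmem, hinf⟩)
      · exact ⟨ph, hmem, hpre.isInfix⟩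
      · exact ⟨ph, hmem, hinf.trans (List.suffix_cons c rest).isInfix⟩
    · rintro ⟨ph, hmem, hinf⟩
      rcases List.infix_cons_iff.mp hinf with hpre | hinf'
      · exact Or.inl ⟨ph, hmem, hpre⟩
      · exact Or.inr ⟨ph, hmem, hinf'⟩

-- A's loop is true exactly when some lowered placeholder occurs in the lowered text
lemma pvLoopA_iff (lower : String) (phs : List String) :
    pvLoopA lower phs = true ↔ ∃ ph ∈ phs, (PySem.Str.lower ph).toList <:+: lower.toList := by
  induction phs with
  | nil => simp [pvLoopA]
  | cons ph rest ih =>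
    show (if PySem.Str.isIn (PySem.Str.lower ph) lower then true else pvLoopA lower rest) = true ↔ _
    by_cases h : PySem.Str.isIn (PySem.Str.lower ph) lower = true
    · rw [if_pos h]
      constructor
      · intro _; exact ⟨ph, List.mem_cons_self, (PySem.Str.isIn_iff_infix _ _).mp h⟩
      · intro _; rfl
    · rw [if_neg h, ih]
      constructor
      · rintro ⟨q, hq, hinf⟩; exact ⟨q, List.mem_cons_of_mem _ hq, hinf⟩
      · rintro ⟨q, hq, hinf⟩
        rcases List.mem_cons.mp hq with rfl | hq'
        · exact absurd ((PySem.Str.isIn_iff_infix _ _).mpr hinf) h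
        · exact ⟨q, hq', hinf⟩

-- the lowered A placeholders are exactly B's placeholder lists
lemma pvPhs_lower_eq : pvPhsA.map (fun ph => (PySem.Str.lower ph).toList) = pvPhsB := by
  decide

-- ===== VERDICT (by name: the statement is the Claim_ definition above) =====
theorem has_placeholder_tokens_py_spec : Claim_equal_has_placeholder_tokens_py := by
  intro capsule _
  unfold Spec_has_placeholder_tokens_py has_placeholder_tokens_py has_placeholder_tokens_py_alt
  rw [Bool.eq_iff_iff, pvLoopA_iff, pvScanB_iff]
  constructor
  · rintro ⟨ph, hmem, hinf⟩
    exact ⟨(PySem.Str.lower ph).toList, pvPhs_lower_eq ▸ List.mem_map_of_mem hmem, hinf⟩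
  · rintro ⟨q, hmem, hinf⟩
    rw [← pvPhs_lower_eq] at hmem
    rcases List.mem_map.mp hmem with ⟨ph, hph, rfl⟩
    exact ⟨ph, hph, hinf⟩
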